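-- pv_equiv track=rewrite | github.com/MrBrantCode/unitest_baseline | mut_generate/mist_train_taco/taco_7211/solution.py | count_valid_altars
-- ===== SOURCE A (Python) =====
-- def count_valid_altars(n, a, b, c):
--     import bisect
--     a.sort()
--     b.sort()
--     c.sort()
--     ans = 0
--     for i in range(n):
--         na = bisect.bisect_left(a, b[i])
--         nc = n - bisect.bisect_right(c, b[i])
--         ans += na * nc
--     return ans
-- ===== SOURCE B (Python) =====
-- def count_valid_altars(n, a, b, c):
--     # Two-pointer sweep over sorted b instead of per-element binary search.
--     # Same in-place sorts of a, b, c as the original.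
--     a.sort()
--     b.sort()
--     c.sort()
--     pa = 0
--     pc = 0
--     ans = 0
--     for i in range(n):
--         v = b[i]
--         while pa < len(a) and a[pa] < v:
--             pa += 1
--         while pc < len(c) and c[pc] <= v:
--             pc += 1
--         ans += pa * (n - pc)
--     return ans
-- ===== Notes on version B (the rewrite author's own statement) =====
-- stated objective: alternative
-- what changed: Replaces the two binary searches per b-element with a single linear two-pointer sweep over sorted b, advancing monotone pointers into sorted a (strictly less) and sorted c (less-or-equal) and accumulating pa*(n-pc); the per-element bisect calls disappear.
import Mathlib
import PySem

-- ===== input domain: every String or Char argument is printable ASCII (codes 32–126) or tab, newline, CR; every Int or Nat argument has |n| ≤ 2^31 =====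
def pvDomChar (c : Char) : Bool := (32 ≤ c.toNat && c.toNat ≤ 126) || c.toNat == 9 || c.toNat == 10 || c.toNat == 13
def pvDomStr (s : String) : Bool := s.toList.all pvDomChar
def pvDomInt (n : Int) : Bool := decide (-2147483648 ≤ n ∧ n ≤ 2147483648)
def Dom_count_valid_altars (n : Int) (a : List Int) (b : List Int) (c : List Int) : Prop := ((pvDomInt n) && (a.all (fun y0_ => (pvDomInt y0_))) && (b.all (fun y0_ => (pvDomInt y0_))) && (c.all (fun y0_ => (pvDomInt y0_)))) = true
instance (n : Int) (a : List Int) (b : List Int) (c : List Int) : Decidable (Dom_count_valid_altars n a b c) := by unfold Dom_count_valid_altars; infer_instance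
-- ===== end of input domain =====

-- B replaces the per-element binary searches with a single two-pointer sweep over sorted b
-- (objective: alternative linear-sweep decomposition). Equivalence is about the RETURN value
-- only: A sorts a, b, c in place; B performs the same in-place sorts.

-- ===== PORT A =====
def count_valid_altars (n : Int) (a : List Int) (b : List Int) (c : List Int) : Int :=
  let sa := PySem.List.sorted a id
  let sb := PySem.List.sorted b id
  let sc := PySem.List.sorted c id
  (PySem.List.pyRange 0 n).foldl
    (fun ans i =>
      let na : Int := (PySem.List.bisectLeft sa (PySem.List.pyGetD sb i 0) : Nat)
      let nc : Int := n - ((PySem.List.bisectRight sc (PySem.List.pyGetD sb i 0) : Nat) : Int)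
      ans + na * nc) 0

-- ===== PORT B =====
-- while pa < len(a) and a[pa] < v: pa += 1   — the pointer is kept as (count consumed, suffix)
def skipLt : List Int → Int → Nat × List Int
  | [], _ => (0, [])
  | x :: xs, v => if x < v then ((skipLt xs v).1 + 1, (skipLt xs v).2) else (0, x :: xs)

-- while pc < len(c) and c[pc] <= v: pc += 1
def skipLe : List Int → Int → Nat × List Int
  | [], _ => (0, [])
  | x :: xs, v => if x ≤ v then ((skipLe xs v).1 + 1, (skipLe xs v).2) else (0, x :: xs)

-- one iteration of B's for-loop body; state = (ans, pa, rest of a, pc, rest of c)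
def bStep (n : Int) (st : Int × Nat × List Int × Nat × List Int) (v : Int) :
    Int × Nat × List Int × Nat × List Int :=
  let sA := skipLt st.2.2.1 v
  let sC := skipLe st.2.2.2.2 v
  let pa := st.2.1 + sA.1
  let pc := st.2.2.2.1 + sC.1
  (st.1 + (pa : Int) * (n - (pc : Int)), pa, sA.2, pc, sC.2)

def count_valid_altars_alt (n : Int) (a : List Int) (b : List Int) (c : List Int) : Int :=
  let sa := PySem.List.sorted a id
  let sb := PySem.List.sorted b id
  let sc := PySem.List.sorted c id
  ((PySem.List.pyRange 0 n).foldl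
      (fun st i => bStep n st (PySem.List.pyGetD sb i 0)) (0, 0, sa, 0, sc)).1

-- ===== PRECONDITION & SPEC =====
-- Pre_ excludes exactly the inputs on which A raises IndexError: b[i] with n > len(b)
-- (B raises the same IndexError there).
def Pre_count_valid_altars (n : Int) (a : List Int) (b : List Int) (c : List Int) : Prop :=
  n ≤ (b.length : Int)
instance (n : Int) (a : List Int) (b : List Int) (c : List Int) : Decidable (Pre_count_valid_altars n a b c) := by unfold Pre_count_valid_altars; infer_instance

def pvWitness_count_valid_altars : Int × List Int × List Int × List Int :=
  (3, [1, 1, 2], [2, 2, 3], [3, 4, 5])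

def Spec_count_valid_altars (n : Int) (a : List Int) (b : List Int) (c : List Int) (out : Int) : Prop := out = count_valid_altars_alt n a b c
instance (n : Int) (a : List Int) (b : List Int) (c : List Int) (out : Int) : Decidable (Spec_count_valid_altars n a b c out) := by unfold Spec_count_valid_altars; infer_instance

-- ===== CLAIM (what is proved, stated in full; the proofs are below) =====
def Claim_equal_count_valid_altars : Prop := ∀ (n : Int) (a : List Int) (b : List Int) (c : List Int), Dom_count_valid_altars n a b c → Pre_count_valid_altars n a b c → Spec_count_valid_altars n a b c (count_valid_altars n a b c)

-- ===== LEMMAS AND PROOFS =====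

-- skipLt/skipLe compute (length of the <-/≤-prefix, the remaining suffix)
theorem skipLt_eq (l : List Int) (v : Int) :
    skipLt l v = ((l.takeWhile (fun x => decide (x < v))).length,
                  l.dropWhile (fun x => decide (x < v))) := by
  induction l with
  | nil => simp [skipLt]
  | cons x xs ih =>
      by_cases h : x < v <;> simp [skipLt, h, List.takeWhile_cons, List.dropWhile_cons, ih]

theorem skipLe_eq (l : List Int) (v : Int) :
    skipLe l v = ((l.takeWhile (fun x => decide (x ≤ v))).length,
                  l.dropWhile (fun x => decide (x ≤ v))) := by
  induction l with
  | nil => simp [skipLe]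
  | cons x xs ih =>
      by_cases h : x ≤ v <;> simp [skipLe, h, List.takeWhile_cons, List.dropWhile_cons, ih]

-- composing prefix extraction for a weaker predicate after a stronger one
theorem dropWhile_dropWhile {α : Type} (p q : α → Bool) (himp : ∀ x, p x → q x) :
    ∀ l : List α, (l.dropWhile p).dropWhile q = l.dropWhile q := by
  intro l
  induction l with
  | nil => simp
  | cons x xs ih =>
      by_cases h : p x
      · simp [List.dropWhile_cons, h, himp x h, ih]
      · simp [List.dropWhile_cons, h]

theorem takeWhile_len_add {α : Type} (p q : α → Bool) (himp : ∀ x, p x → q x) :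
    ∀ l : List α,
      (l.takeWhile p).length + ((l.dropWhile p).takeWhile q).length = (l.takeWhile q).length := by
  intro l
  induction l with
  | nil => simp
  | cons x xs ih =>
      by_cases h : p x
      · simp [List.takeWhile_cons, List.dropWhile_cons, h, himp x h, ← ih]
        omega
      · simp [List.takeWhile_cons, List.dropWhile_cons, h]

-- a prefix-length characterised by an index split
theorem takeWhile_len_of_split {α : Type} (p : α → Bool) :
    ∀ (l : List α) (k : Nat), k ≤ l.length →
      (∀ j (hj : j < l.length), j < k → p l[j]) →
      (∀ j (hj : j < l.length), k ≤ j → ¬ p l[j]) →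
      (l.takeWhile p).length = k := by
  intro l
  induction l with
  | nil => intro k hk _ _; simp at hk ⊢; omega
  | cons x xs ih =>
      intro k hk h1 h2
      cases k with
      | zero =>
          have := h2 0 (by simp) (Nat.zero_le _)
          simp at this
          simp [List.takeWhile_cons, this]
      | succ k' =>
          have hx : p x := by simpa using h1 0 (by simp) (Nat.succ_pos _)
          have : (xs.takeWhile p).length = k' := by
            refine ih k' (by simpa using hk) ?_ ?_
            · intro j hj hjk
              simpa using h1 (j + 1) (by simpa using Nat.succ_lt_succ hj) (Nat.succ_lt_succ hjk)
            · intro j hj hjk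
              simpa using h2 (j + 1) (by simpa using Nat.succ_lt_succ hj) (Nat.succ_le_succ hjk)
          simp [List.takeWhile_cons, hx, this]

theorem bisectLeft_eq_takeWhile (l : List Int) (v : Int)
    (hs : l.Pairwise (fun x y => x ≤ y)) :
    PySem.List.bisectLeft l v = (l.takeWhile (fun x => decide (x < v))).length := by
  obtain ⟨hk, h1, h2⟩ := PySem.List.bisectLeft_spec l v hs
  exact (takeWhile_len_of_split _ l _ hk
    (fun j hj hjk => by simpa using h1 j hj hjk)
    (fun j hj hjk => by simpa using not_lt.mpr (h2 j hj hjk))).symm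

theorem bisectRight_eq_takeWhile (l : List Int) (v : Int)
    (hs : l.Pairwise (fun x y => x ≤ y)) :
    PySem.List.bisectRight l v = (l.takeWhile (fun x => decide (x ≤ v))).length := by
  obtain ⟨hk, h1, h2⟩ := PySem.List.bisectRight_spec l v hs
  exact (takeWhile_len_of_split _ l _ hk
    (fun j hj hjk => by simpa using h1 j hj hjk)
    (fun j hj hjk => by simpa using not_le.mpr (h2 j hj hjk))).symm

-- a fold over range(n) reading xs[i] is a fold over the first n elements
theorem foldl_range_getD {β : Type} (xs : List Int) (f : β → Int → β) (init : β) (n : Int)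
    (hn : n ≤ (xs.length : Int)) :
    (PySem.List.pyRange 0 n).foldl (fun acc j => f acc (PySem.List.pyGetD xs j 0)) init
      = (xs.take n.toNat).foldl f init := by
  by_cases h : n ≤ 0
  · simp [PySem.List.pyRange_one_eq_nil h, Int.toNat_of_nonpos h]
  · rw [Int.not_le] at h
    have hlen : PySem.List.len (xs.take n.toNat) = n := by
      simp [PySem.List.len]
      omega
    have hcongr : (PySem.List.pyRange 0 n).foldl
        (fun acc j => f acc (PySem.List.pyGetD xs j 0)) init
        = (PySem.List.pyRange 0 n).foldl
        (fun acc j => f acc (PySem.List.pyGetD (xs.take n.toNat) j 0)) init := by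
      refine PySem.List.foldl_congr_mem _ _ _ _ ?_
      intro acc j hj
      obtain ⟨hj0, hjn⟩ := PySem.List.mem_pyRange_one.mp hj
      have hjlt : j < (xs.length : Int) := lt_of_lt_of_le hjn hn
      have hjt : j.toNat < xs.length := by omega
      have hjt' : j.toNat < (xs.take n.toNat).length := by simp; omega
      rw [PySem.List.pyGetD_eq_getElem xs 0 hj0 (by simpa [PySem.List.len] using hjlt),
          PySem.List.pyGetD_eq_getElem (xs.take n.toNat) 0 hj0 (by simp; omega)]
      simp
    have hfold := PySem.List.foldl_pyRange_pyGetD (xs.take n.toNat) 0 f init (le_refl 0)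
    rw [hlen] at hfold
    simpa using hcongr.trans hfold
-- the two-pointer sweep equals the per-element prefix counts, given the pointer invariant
theorem sweep_eq (n : Int) (sa0 sc0 : List Int) :
    ∀ (bs : List Int), bs.Pairwise (fun x y => x ≤ y) →
    ∀ (ans : Int) (ka kc : Nat) (ra rc : List Int),
    (∀ v ∈ bs, ka + (ra.takeWhile (fun x => decide (x < v))).length
        = (sa0.takeWhile (fun x => decide (x < v))).length) →
    (∀ v ∈ bs, ra.dropWhile (fun x => decide (x < v)) = sa0.dropWhile (fun x => decide (x < v))) →
    (∀ v ∈ bs, kc + (rc.takeWhile (fun x => decide (x ≤ v))).length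
        = (sc0.takeWhile (fun x => decide (x ≤ v))).length) →
    (∀ v ∈ bs, rc.dropWhile (fun x => decide (x ≤ v)) = sc0.dropWhile (fun x => decide (x ≤ v))) →
    (bs.foldl (bStep n) (ans, ka, ra, kc, rc)).1
      = bs.foldl (fun acc v => acc
          + ((sa0.takeWhile (fun x => decide (x < v))).length : Int)
            * (n - ((sc0.takeWhile (fun x => decide (x ≤ v))).length : Int))) ans := by
  intro bs
  induction bs with
  | nil => intro _ ans ka kc ra rc _ _ _ _; simp
  | cons v bs' ih =>
      intro hp ans ka kc ra rc hA1 hA2 hC1 hC2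
      have hv : ∀ v' ∈ bs', v ≤ v' := (List.pairwise_cons.mp hp).1
      have hp' : bs'.Pairwise (fun x y => x ≤ y) := (List.pairwise_cons.mp hp).2
      have hkA : ka + (ra.takeWhile (fun x => decide (x < v))).length
          = (sa0.takeWhile (fun x => decide (x < v))).length := hA1 v (by simp)
      have hkC : kc + (rc.takeWhile (fun x => decide (x ≤ v))).length
          = (sc0.takeWhile (fun x => decide (x ≤ v))).length := hC1 v (by simp)
      have hdA : ra.dropWhile (fun x => decide (x < v)) = sa0.dropWhile (fun x => decide (x < v)) :=
        hA2 v (by simp)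
      have hdC : rc.dropWhile (fun x => decide (x ≤ v)) = sc0.dropWhile (fun x => decide (x ≤ v)) :=
        hC2 v (by simp)
      have himpA : ∀ v' ∈ bs', ∀ x : Int, decide (x < v) → decide (x < v') := fun v' hv' x hx =>
        by simpa using lt_of_lt_of_le (by simpa using hx) (hv v' hv')
      have himpC : ∀ v' ∈ bs', ∀ x : Int, decide (x ≤ v) → decide (x ≤ v') := fun v' hv' x hx =>
        by simpa using le_trans (by simpa using hx) (hv v' hv')
      have h1 : ∀ v' ∈ bs',
          (sa0.takeWhile (fun x => decide (x < v))).length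
            + (((sa0.dropWhile (fun x => decide (x < v))).takeWhile (fun x => decide (x < v'))).length)
            = (sa0.takeWhile (fun x => decide (x < v'))).length :=
        fun v' hv' => takeWhile_len_add _ _ (himpA v' hv') sa0
      have h2 : ∀ v' ∈ bs',
          (sa0.dropWhile (fun x => decide (x < v))).dropWhile (fun x => decide (x < v'))
            = sa0.dropWhile (fun x => decide (x < v')) :=
        fun v' hv' => dropWhile_dropWhile _ _ (himpA v' hv') sa0
      have h3 : ∀ v' ∈ bs',
          (sc0.takeWhile (fun x => decide (x ≤ v))).length
            + (((sc0.dropWhile (fun x => decide (x ≤ v))).takeWhile (fun x => decide (x ≤ v'))).length)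
            = (sc0.takeWhile (fun x => decide (x ≤ v'))).length :=
        fun v' hv' => takeWhile_len_add _ _ (himpC v' hv') sc0
      have h4 : ∀ v' ∈ bs',
          (sc0.dropWhile (fun x => decide (x ≤ v))).dropWhile (fun x => decide (x ≤ v'))
            = sc0.dropWhile (fun x => decide (x ≤ v')) :=
        fun v' hv' => dropWhile_dropWhile _ _ (himpC v' hv') sc0
      simp only [List.foldl_cons, bStep, skipLt_eq, skipLe_eq, hkA, hdA, hkC, hdC]
      exact ih hp' _ _ _ _ _ h1 h2 h3 h4

-- ===== VERDICT (by name: the statement is the Claim_ definition above) =====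
theorem count_valid_altars_spec : Claim_equal_count_valid_altars := by
  intro n a b c _ hpre
  have hsa : (PySem.List.sorted a id).Pairwise (fun x y => x ≤ y) := by
    simpa using PySem.List.sorted_pairwise a id
  have hsc : (PySem.List.sorted c id).Pairwise (fun x y => x ≤ y) := by
    simpa using PySem.List.sorted_pairwise c id
  have hsb : (PySem.List.sorted b id).Pairwise (fun x y => x ≤ y) := by
    simpa using PySem.List.sorted_pairwise b id
  have hlenb : n ≤ ((PySem.List.sorted b id).length : Int) := by
    rw [PySem.List.length_sorted]; exact hpre
  simp only [Spec_count_valid_altars, count_valid_altars, count_valid_altars_alt]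
  rw [foldl_range_getD (PySem.List.sorted b id)
        (fun ans v => ans + ((PySem.List.bisectLeft (PySem.List.sorted a id) v : Nat) : Int)
          * (n - ((PySem.List.bisectRight (PySem.List.sorted c id) v : Nat) : Int))) 0 n hlenb,
      foldl_range_getD (PySem.List.sorted b id) (fun st v => bStep n st v) _ n hlenb]
  rw [sweep_eq n (PySem.List.sorted a id) (PySem.List.sorted c id)
        _ (hsb.take) 0 0 0 _ _
        (by intro v _; simp) (by intro v _; rfl) (by intro v _; simp) (by intro v _; rfl)]
  refine PySem.List.foldl_congr_mem _ _ _ _ ?_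
  intro acc v _
  rw [bisectLeft_eq_takeWhile _ _ hsa, bisectRight_eq_takeWhile _ _ hsc]
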